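-- pv_equiv track=rewrite | github.com/rish246/data_mining_lab | Practical4/Lab Assignment 4/feature_extraction.py | process_seq
-- ===== SOURCE A (Python) =====
-- def process_seq(class_, seq):
--
--     input_config = {
--         'F1' : 0,
--         'F2' : 0,
--         'F3' : 0,
--         'F4' : 0,
--         'F5' : 0,
--         'F6' : 0,
--         'Class' : 0
--
--     }
--
--     resultant = {
--                 'N' : 'F1',
--                 'H' : 'F2',
--                 'Q' : 'F3',
--                 'G' : 'F4',
--                 'D' : 'F5',
--                 'T' : 'F6'
--
--             }
--
--     input_config['Class'] = class_
--
--
--     is_valid_line = True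
--
--     for char in seq:
--
--         if char in resultant.keys():
--
--             input_config[resultant[char]] += 1
--
--         elif char.isdigit() or char in ['+', '-']:
--             # Write this in the log file
--             is_valid_line = False
--
--             break
--
--     return is_valid_line, input_config
-- ===== SOURCE B (Python) =====
-- def process_seq(class_, seq):
--     cutoff = next((i for i, ch in enumerate(seq) if ch.isdigit() or ch in '+-'), None)
--     prefix = seq if cutoff is None else seq[:cutoff]
--     return cutoff is None, {
--         'F1': prefix.count('N'),
--         'F2': prefix.count('H'),
--         'F3': prefix.count('Q'),
--         'F4': prefix.count('G'),
--         'F5': prefix.count('D'),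
--         'F6': prefix.count('T'),
--         'Class': class_,
--     }
-- ===== Notes on version B (the rewrite author's own statement) =====
-- stated objective: simpler
-- what changed: Replaces the single interleaved tally-or-break loop over a mutable dict with a two-pass shape: one scan finds the cutoff (index of the first digit/sign character, via next over enumerate), then the result dict is built in one expression from str.count of each mapped character over the clean prefix.
import Mathlib
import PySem

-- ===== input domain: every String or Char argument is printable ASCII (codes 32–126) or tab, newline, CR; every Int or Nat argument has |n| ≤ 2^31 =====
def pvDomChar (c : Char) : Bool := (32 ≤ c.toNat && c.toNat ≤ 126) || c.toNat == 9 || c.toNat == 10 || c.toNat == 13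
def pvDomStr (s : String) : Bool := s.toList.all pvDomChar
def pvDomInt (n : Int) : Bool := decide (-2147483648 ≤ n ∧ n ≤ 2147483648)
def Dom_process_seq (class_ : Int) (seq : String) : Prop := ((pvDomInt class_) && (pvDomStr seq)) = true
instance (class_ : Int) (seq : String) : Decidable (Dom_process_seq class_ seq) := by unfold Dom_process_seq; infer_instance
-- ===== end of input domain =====

-- B finds the first invalid character in a separate scan, then counts each mapped
-- character in the clean prefix with str.count — a simpler two-pass decomposition
-- returning the same values.

-- ===== PORT A =====
-- the 'resultant' dict of A
def pvResultant : PySem.Dict Char String :=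
  PySem.Dict.ofList [('N', "F1"), ('H', "F2"), ('Q', "F3"), ('G', "F4"), ('D', "F5"), ('T', "F6")]

-- A's for-loop with break: state = (is_valid_line, input_config)
def pvLoopA (d : PySem.Dict String Int) : List Char → Bool × PySem.Dict String Int
  | [] => (true, d)
  | ch :: rest =>
    match pvResultant.get? ch with
    | some f => pvLoopA (d.modify f 0 (· + 1)) rest
    | none =>
      if PySem.Chars.isdigit ch || ch == '+' || ch == '-' then (false, d)
      else pvLoopA d rest

def process_seq (class_ : Int) (seq : String) : Bool × (List (String × Int)) :=
  let input_config : PySem.Dict String Int :=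
    PySem.Dict.ofList [("F1", 0), ("F2", 0), ("F3", 0), ("F4", 0), ("F5", 0), ("F6", 0), ("Class", 0)]
  let input_config := input_config.insert "Class" class_
  let r := pvLoopA input_config seq.toList
  (r.1, r.2.items)

-- ===== PORT B =====
def process_seq_alt (class_ : Int) (seq : String) : Bool × (List (String × Int)) :=
  let cs := seq.toList
  -- next((i for i, ch in enumerate(seq) if ch.isdigit() or ch in '+-'), None)
  let cutoff := cs.findIdx? (fun ch => PySem.Chars.isdigit ch || ch == '+' || ch == '-')
  -- prefix = seq if cutoff is None else seq[:cutoff]  (cutoff ≥ 0, so take is exact)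
  let pre := match cutoff with | none => cs | some i => cs.take i
  (cutoff.isNone,
    [("F1", (PySem.List.count pre 'N' : Int)),
     ("F2", (PySem.List.count pre 'H' : Int)),
     ("F3", (PySem.List.count pre 'Q' : Int)),
     ("F4", (PySem.List.count pre 'G' : Int)),
     ("F5", (PySem.List.count pre 'D' : Int)),
     ("F6", (PySem.List.count pre 'T' : Int)),
     ("Class", class_)])

-- ===== PRECONDITION & SPEC =====
def Spec_process_seq (class_ : Int) (seq : String) (out : Bool × (List (String × Int))) : Prop := out = process_seq_alt class_ seq
instance (class_ : Int) (seq : String) (out : Bool × (List (String × Int))) : Decidable (Spec_process_seq class_ seq out) := by unfold Spec_process_seq; infer_instance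

-- ===== CLAIM (what is proved, stated in full; the proofs are below) =====
def Claim_equal_process_seq : Prop := ∀ (class_ : Int) (seq : String), Dom_process_seq class_ seq → Spec_process_seq class_ seq (process_seq class_ seq)

-- ===== LEMMAS AND PROOFS =====

-- the dict A's loop carries, as a function of its seven values
def pvMkD (a b c d e f cl : Int) : PySem.Dict String Int :=
  PySem.Dict.mk [("F1", a), ("F2", b), ("F3", c), ("F4", d), ("F5", e), ("F6", f), ("Class", cl)]

def pvBad (ch : Char) : Bool := PySem.Chars.isdigit ch || ch == '+' || ch == '-'

def pvPre (cs : List Char) : List Char :=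
  match cs.findIdx? pvBad with | none => cs | some i => cs.take i

lemma pvResultant_eq : pvResultant = PySem.Dict.mk
    [('N', "F1"), ('H', "F2"), ('Q', "F3"), ('G', "F4"), ('D', "F5"), ('T', "F6")] := by decide

lemma pvPre_cons_bad {ch : Char} (cs : List Char) (h : pvBad ch = true) :
    pvPre (ch :: cs) = [] := by
  simp [pvPre, List.findIdx?_cons, h]

lemma pvPre_cons_good {ch : Char} (cs : List Char) (h : pvBad ch = false) :
    pvPre (ch :: cs) = ch :: pvPre cs := by
  simp only [pvPre, List.findIdx?_cons, h]
  cases cs.findIdx? pvBad <;> simp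

lemma pvIsNone_cons_good {ch : Char} (cs : List Char) (h : pvBad ch = false) :
    ((ch :: cs).findIdx? pvBad).isNone = (cs.findIdx? pvBad).isNone := by
  simp only [List.findIdx?_cons, h]
  cases cs.findIdx? pvBad <;> simp

lemma pvLoopA_spec (cs : List Char) (a b c d e f cl : Int) :
    pvLoopA (pvMkD a b c d e f cl) cs =
      ((cs.findIdx? pvBad).isNone,
        pvMkD (a + PySem.List.count (pvPre cs) 'N') (b + PySem.List.count (pvPre cs) 'H')
              (c + PySem.List.count (pvPre cs) 'Q') (d + PySem.List.count (pvPre cs) 'G')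
              (e + PySem.List.count (pvPre cs) 'D') (f + PySem.List.count (pvPre cs) 'T') cl) := by
  induction cs generalizing a b c d e f with
  | nil => simp [pvLoopA, pvPre, PySem.List.count]
  | cons ch rest ih =>
    by_cases hN : ch = 'N'
    · subst hN
      rw [pvLoopA]
      show pvLoopA (PySem.Dict.modify _ "F1" 0 (· + 1)) rest = _
      have hm : (pvMkD a b c d e f cl).modify "F1" 0 (· + 1) = pvMkD (a + 1) b c d e f cl := by
        simp [pvMkD, PySem.Dict.modify, PySem.Dict.contains, PySem.Dict.insert]; rfl
      rw [hm, ih, pvPre_cons_good _ (by decide), pvIsNone_cons_good _ (by decide)]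
      simp [PySem.List.count]
      congr 1; omega
    by_cases hH : ch = 'H'
    · subst hH
      rw [pvLoopA]
      show pvLoopA (PySem.Dict.modify _ "F2" 0 (· + 1)) rest = _
      have hm : (pvMkD a b c d e f cl).modify "F2" 0 (· + 1) = pvMkD a (b + 1) c d e f cl := by
        simp [pvMkD, PySem.Dict.modify, PySem.Dict.contains, PySem.Dict.insert]; rfl
      rw [hm, ih, pvPre_cons_good _ (by decide), pvIsNone_cons_good _ (by decide)]
      simp [PySem.List.count]
      congr 1; omega
    by_cases hQ : ch = 'Q'
    · subst hQ
      rw [pvLoopA]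
      show pvLoopA (PySem.Dict.modify _ "F3" 0 (· + 1)) rest = _
      have hm : (pvMkD a b c d e f cl).modify "F3" 0 (· + 1) = pvMkD a b (c + 1) d e f cl := by
        simp [pvMkD, PySem.Dict.modify, PySem.Dict.contains, PySem.Dict.insert]; rfl
      rw [hm, ih, pvPre_cons_good _ (by decide), pvIsNone_cons_good _ (by decide)]
      simp [PySem.List.count]
      congr 1; omega
    by_cases hG : ch = 'G'
    · subst hG
      rw [pvLoopA]
      show pvLoopA (PySem.Dict.modify _ "F4" 0 (· + 1)) rest = _
      have hm : (pvMkD a b c d e f cl).modify "F4" 0 (· + 1) = pvMkD a b c (d + 1) e f cl := by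
        simp [pvMkD, PySem.Dict.modify, PySem.Dict.contains, PySem.Dict.insert]; rfl
      rw [hm, ih, pvPre_cons_good _ (by decide), pvIsNone_cons_good _ (by decide)]
      simp [PySem.List.count]
      congr 1; omega
    by_cases hD : ch = 'D'
    · subst hD
      rw [pvLoopA]
      show pvLoopA (PySem.Dict.modify _ "F5" 0 (· + 1)) rest = _
      have hm : (pvMkD a b c d e f cl).modify "F5" 0 (· + 1) = pvMkD a b c d (e + 1) f cl := by
        simp [pvMkD, PySem.Dict.modify, PySem.Dict.contains, PySem.Dict.insert]; rfl
      rw [hm, ih, pvPre_cons_good _ (by decide), pvIsNone_cons_good _ (by decide)]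
      simp [PySem.List.count]
      congr 1; omega
    by_cases hT : ch = 'T'
    · subst hT
      rw [pvLoopA]
      show pvLoopA (PySem.Dict.modify _ "F6" 0 (· + 1)) rest = _
      have hm : (pvMkD a b c d e f cl).modify "F6" 0 (· + 1) = pvMkD a b c d e (f + 1) cl := by
        simp [pvMkD, PySem.Dict.modify, PySem.Dict.contains, PySem.Dict.insert]; rfl
      rw [hm, ih, pvPre_cons_good _ (by decide), pvIsNone_cons_good _ (by decide)]
      simp [PySem.List.count]
      congr 1; omega
    -- unmapped character
    have hget : pvResultant.get? ch = none := by
      rw [pvResultant_eq]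
      simp [PySem.Dict.get?, Ne.symm hN, Ne.symm hH, Ne.symm hQ,
        Ne.symm hG, Ne.symm hD, Ne.symm hT]
    rw [pvLoopA, hget]
    by_cases hbad : pvBad ch = true
    · rw [if_pos (by simpa [pvBad] using hbad)]
      rw [pvPre_cons_bad _ hbad]
      simp [PySem.List.count, List.findIdx?_cons, pvBad] at hbad ⊢
      simp [hbad]
    · have hbad' : pvBad ch = false := by simpa using hbad
      rw [if_neg (by simpa [pvBad] using hbad')]
      rw [ih, pvPre_cons_good _ hbad', pvIsNone_cons_good _ hbad']
      simp [PySem.List.count, hN, hH, hQ, hG, hD, hT]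

theorem process_seq_spec : Claim_equal_process_seq := by
  intro class_ seq _
  show process_seq class_ seq = process_seq_alt class_ seq
  have h1 : process_seq class_ seq =
      ((pvLoopA (pvMkD 0 0 0 0 0 0 class_) seq.toList).1,
       (pvLoopA (pvMkD 0 0 0 0 0 0 class_) seq.toList).2.items) := rfl
  have h2 : process_seq_alt class_ seq =
      ((seq.toList.findIdx? pvBad).isNone,
        [("F1", (PySem.List.count (pvPre seq.toList) 'N' : Int)),
         ("F2", (PySem.List.count (pvPre seq.toList) 'H' : Int)),
         ("F3", (PySem.List.count (pvPre seq.toList) 'Q' : Int)),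
         ("F4", (PySem.List.count (pvPre seq.toList) 'G' : Int)),
         ("F5", (PySem.List.count (pvPre seq.toList) 'D' : Int)),
         ("F6", (PySem.List.count (pvPre seq.toList) 'T' : Int)),
         ("Class", class_)]) := rfl
  rw [h1, h2, pvLoopA_spec]
  simp [pvMkD]
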